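-- pv_equiv track=rewrite | github.com/SunnyYie/agent-flow-next | plugins/hermes-skillops/core/skill_manager.py | _parse_body_sections
-- ===== SOURCE A (Python) =====
-- def _parse_body_sections(content: str) -> tuple[str, str]:
--     """Parse Procedure and Rules sections from handler.md body.
--
--     Returns (procedure_text, rules_text).
--     """
--     # Strip frontmatter
--     if content.startswith("---"):
--         end = content.find("---", 3)
--         if end != -1:
--             body = content[end + 3:].strip()
--         else:
--             body = content
--     else:
--         body = content
--
--     procedure = ""
--     rules = ""
--
--     lines = body.split("\n")
--     current_section = None
--     procedure_lines: list[str] = []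
--     rules_lines: list[str] = []
--
--     for line in lines:
--         stripped = line.strip()
--         if stripped == "## Procedure":
--             current_section = "procedure"
--             continue
--         elif stripped == "## Rules":
--             current_section = "rules"
--             continue
--         elif stripped.startswith("## ") and current_section is not None:
--             # New section ends the current one
--             current_section = None
--             continue
--
--         if current_section == "procedure":
--             procedure_lines.append(line)
--         elif current_section == "rules":
--             rules_lines.append(line)
--
--     procedure = "\n".join(procedure_lines).strip()
--     rules = "\n".join(rules_lines).strip()
--     return procedure, rules
-- ===== SOURCE B (Python) =====
-- def _parse_body_sections(content: str) -> tuple[str, str]: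
--     """One-pass bucketing: group lines under each '## ' header in a dict,
--     then read off the Procedure and Rules buckets."""
--     # Strip frontmatter (same prefix as the original)
--     if content.startswith("---"):
--         end = content.find("---", 3)
--         body = content[end + 3:].strip() if end != -1 else content
--     else:
--         body = content
--
--     sections: dict = {}
--     current = None
--     for line in body.split("\n"):
--         stripped = line.strip()
--         if stripped.startswith("## "):
--             current = stripped
--             sections.setdefault(current, [])
--         else:
--             sections.setdefault(current, []).append(line)
--
--     return (
--         "\n".join(sections.get("## Procedure", [])).strip(),
--         "\n".join(sections.get("## Rules", [])).strip(),
--     )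
-- ===== Notes on version B (the rewrite author's own statement) =====
-- stated objective: idiomatic
-- what changed: Replaces A's hard-coded two-section state machine (two named line buffers plus a three-way current_section tag) by a generic one-pass grouping of lines into a dict of per-header buckets keyed by the stripped header text, from which the Procedure and Rules sections are read off at the end.
import Mathlib
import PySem

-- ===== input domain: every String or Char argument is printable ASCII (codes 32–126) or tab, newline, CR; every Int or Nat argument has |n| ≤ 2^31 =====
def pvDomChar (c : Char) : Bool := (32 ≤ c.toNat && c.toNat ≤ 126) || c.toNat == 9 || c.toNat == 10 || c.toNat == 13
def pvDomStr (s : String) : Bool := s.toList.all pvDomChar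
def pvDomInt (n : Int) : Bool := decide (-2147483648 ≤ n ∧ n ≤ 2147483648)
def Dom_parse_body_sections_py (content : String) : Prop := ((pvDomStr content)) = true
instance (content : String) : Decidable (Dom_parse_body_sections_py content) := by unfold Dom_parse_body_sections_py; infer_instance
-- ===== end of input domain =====

-- B replaces A's hard-coded two-section state machine by a generic one-pass grouping of
-- lines into per-header buckets (a dict keyed by the stripped header text), then reads off
-- the Procedure and Rules buckets; objective: more idiomatic/general, same cost.

-- ===== PORT A =====
-- frontmatter stripping, shared verbatim by both Pythons (A's and B's prefix are identical code)
def pvBody (content : String) : String :=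
  if PySem.Str.startswith content "---" then
    let e := PySem.Str.findFrom content "---" 3
    if e ≠ -1 then PySem.Str.strip (PySem.Str.slice content (some (e + 3)) none)
    else content
  else content

-- A's for-loop: state (current_section, procedure_lines, rules_lines)
def pvLoopA : List String → Option String → List String → List String → List String × List String
  | [], _, pl, rl => (pl, rl)
  | line :: rest, cur, pl, rl =>
    let stripped := PySem.Str.strip line
    if stripped = "## Procedure" then pvLoopA rest (some "procedure") pl rl
    else if stripped = "## Rules" then pvLoopA rest (some "rules") pl rl
    else if PySem.Str.startswith stripped "## " = true ∧ cur ≠ none then pvLoopA rest none pl rl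
    else if cur = some "procedure" then pvLoopA rest cur (pl ++ [line]) rl
    else if cur = some "rules" then pvLoopA rest cur pl (rl ++ [line])
    else pvLoopA rest cur pl rl

def parse_body_sections_py (content : String) : String × String :=
  let body := pvBody content
  let lines := (PySem.Str.split? body "\n").getD []   -- sep "\n" ≠ "", split? is always some
  let r := pvLoopA lines none [] []
  (PySem.Str.strip (PySem.Str.join "\n" r.1), PySem.Str.strip (PySem.Str.join "\n" r.2))

-- ===== PORT B =====
-- B's for-loop: state (sections dict keyed by Option header-text, current bucket key);
-- `sections.setdefault(k, []).append(line)` mutates the stored list = insert k (getD k [] ++ [line])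
def pvLoopB : List String → PySem.Dict (Option String) (List String) → Option String →
    PySem.Dict (Option String) (List String)
  | [], d, _ => d
  | line :: rest, d, cur =>
    let stripped := PySem.Str.strip line
    if PySem.Str.startswith stripped "## " then
      pvLoopB rest (d.setdefault (some stripped) []) (some stripped)
    else
      pvLoopB rest (d.insert cur (d.getD cur [] ++ [line])) cur

def parse_body_sections_py_alt (content : String) : String × String :=
  let body := pvBody content
  let lines := (PySem.Str.split? body "\n").getD []
  let d := pvLoopB lines PySem.Dict.empty none
  (PySem.Str.strip (PySem.Str.join "\n" (d.getD (some "## Procedure") [])),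
   PySem.Str.strip (PySem.Str.join "\n" (d.getD (some "## Rules") [])))

-- ===== PRECONDITION & SPEC =====
def Spec_parse_body_sections_py (content : String) (out : String × String) : Prop := out = parse_body_sections_py_alt content
instance (content : String) (out : String × String) : Decidable (Spec_parse_body_sections_py content out) := by unfold Spec_parse_body_sections_py; infer_instance

-- ===== CLAIM (what is proved, stated in full; the proofs are below) =====
def Claim_equal_parse_body_sections_py : Prop := ∀ (content : String), Dom_parse_body_sections_py content → Spec_parse_body_sections_py content (parse_body_sections_py content)

-- ===== LEMMAS AND PROOFS =====

-- Loop invariant: A's two line-buffers are B's two buckets, and A's section tag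
-- mirrors B's current bucket key.
theorem pvLoop_eq (lines : List String) (curA : Option String) (pl rl : List String)
    (d : PySem.Dict (Option String) (List String)) (curB : Option String)
    (h1 : d.getD (some "## Procedure") [] = pl)
    (h2 : d.getD (some "## Rules") [] = rl)
    (h3 : curA = some "procedure" ↔ curB = some "## Procedure")
    (h4 : curA = some "rules" ↔ curB = some "## Rules")
    (h5 : curA = none ∨ curA = some "procedure" ∨ curA = some "rules") :
    pvLoopA lines curA pl rl =
      ((pvLoopB lines d curB).getD (some "## Procedure") [],
       (pvLoopB lines d curB).getD (some "## Rules") []) := by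
  induction lines generalizing curA pl rl d curB with
  | nil => simp [pvLoopA, pvLoopB, h1, h2]
  | cons line rest ih =>
    simp only [pvLoopA, pvLoopB]
    by_cases hp : PySem.Str.strip line = "## Procedure"
    · rw [if_pos hp]
      have hsw : PySem.Str.startswith (PySem.Str.strip line) "## " = true := by
        rw [hp]; decide
      rw [if_pos hsw, hp]
      apply ih
      · rw [PySem.Dict.getD_setdefault_self, h1]
      · rw [PySem.Dict.getD_eq_get?_getD,
            PySem.Dict.get?_setdefault_of_ne _ _ (by decide),
            ← PySem.Dict.getD_eq_get?_getD, h2]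
      · exact ⟨(fun _ => rfl), (fun _ => rfl)⟩
      · decide
      · exact Or.inr (Or.inl rfl)
    · rw [if_neg hp]
      by_cases hr : PySem.Str.strip line = "## Rules"
      · rw [if_pos hr]
        have hsw : PySem.Str.startswith (PySem.Str.strip line) "## " = true := by
          rw [hr]; decide
        rw [if_pos hsw, hr]
        apply ih
        · rw [PySem.Dict.getD_eq_get?_getD,
              PySem.Dict.get?_setdefault_of_ne _ _ (by decide),
              ← PySem.Dict.getD_eq_get?_getD, h1]
        · rw [PySem.Dict.getD_setdefault_self, h2]
        · decide
        · exact ⟨(fun _ => rfl), (fun _ => rfl)⟩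
        · exact Or.inr (Or.inr rfl)
      · rw [if_neg hr]
        by_cases hsw : PySem.Str.startswith (PySem.Str.strip line) "## " = true
        · -- an "other" header: A ends any open section; B opens that header's bucket
          rw [if_pos hsw]
          have hkp : (some (PySem.Str.strip line) : Option String) ≠ some "## Procedure" := by
            simp [hp]
          have hkr : (some (PySem.Str.strip line) : Option String) ≠ some "## Rules" := by
            simp [hr]
          have hstep : ∀ c' : Option String, c' = none →
              pvLoopA rest c' pl rl =
                ((pvLoopB rest (d.setdefault (some (PySem.Str.strip line)) [])
                    (some (PySem.Str.strip line))).getD (some "## Procedure") [],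
                 (pvLoopB rest (d.setdefault (some (PySem.Str.strip line)) [])
                    (some (PySem.Str.strip line))).getD (some "## Rules") []) := by
            intro c' hc'
            apply ih
            · rw [PySem.Dict.getD_eq_get?_getD,
                  PySem.Dict.get?_setdefault_of_ne _ _ (Ne.symm hkp),
                  ← PySem.Dict.getD_eq_get?_getD, h1]
            · rw [PySem.Dict.getD_eq_get?_getD,
                  PySem.Dict.get?_setdefault_of_ne _ _ (Ne.symm hkr),
                  ← PySem.Dict.getD_eq_get?_getD, h2]
            · rw [hc']; exact ⟨(fun h => nomatch h), (fun h => absurd h hkp)⟩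
            · rw [hc']; exact ⟨(fun h => nomatch h), (fun h => absurd h hkr)⟩
            · exact Or.inl hc'
          by_cases hcn : curA = none
          · -- current section already None: A's elif guard fails, appends nothing
            rw [if_neg (by simp [hcn]), if_neg (by simp [hcn]), if_neg (by simp [hcn])]
            exact hstep curA hcn
          · rw [if_pos ⟨hsw, hcn⟩]
            exact hstep none rfl
        · -- a content line
          rw [if_neg (fun hco => hsw hco.1)]  -- A's header guard
          rw [if_neg hsw]                     -- B's header test
          rcases h5 with hcn | hcp | hcr
          · -- no open section: A drops the line; B appends it to the non-P/R bucket curB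
            have hbp : curB ≠ some "## Procedure" := fun h => by
              have hc := h3.mpr h; rw [hcn] at hc; exact nomatch hc
            have hbr : curB ≠ some "## Rules" := fun h => by
              have hc := h4.mpr h; rw [hcn] at hc; exact nomatch hc
            rw [if_neg (by simp [hcn]), if_neg (by simp [hcn])]
            apply ih
            · rw [PySem.Dict.getD_eq_get?_getD,
                  PySem.Dict.get?_insert_of_ne _ _ (fun h => hbp h.symm),
                  ← PySem.Dict.getD_eq_get?_getD, h1]
            · rw [PySem.Dict.getD_eq_get?_getD,
                  PySem.Dict.get?_insert_of_ne _ _ (fun h => hbr h.symm),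
                  ← PySem.Dict.getD_eq_get?_getD, h2]
            · rw [hcn]; exact ⟨(fun h => nomatch h), (fun h => absurd h hbp)⟩
            · rw [hcn]; exact ⟨(fun h => nomatch h), (fun h => absurd h hbr)⟩
            · exact Or.inl hcn
          · -- procedure section open
            have hbp : curB = some "## Procedure" := h3.mp hcp
            have hbr : curB ≠ some "## Rules" := by rw [hbp]; decide
            rw [if_pos hcp]
            apply ih
            · rw [hbp, PySem.Dict.getD_insert_self, h1]
            · rw [PySem.Dict.getD_eq_get?_getD,
                  PySem.Dict.get?_insert_of_ne _ _ (fun h => hbr h.symm),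
                  ← PySem.Dict.getD_eq_get?_getD, h2]
            · exact h3
            · exact h4
            · exact Or.inr (Or.inl hcp)
          · -- rules section open
            have hbr : curB = some "## Rules" := h4.mp hcr
            have hbp : curB ≠ some "## Procedure" := by rw [hbr]; decide
            rw [if_neg (by simp [hcr]), if_pos hcr]
            apply ih
            · rw [PySem.Dict.getD_eq_get?_getD,
                  PySem.Dict.get?_insert_of_ne _ _ (fun h => hbp h.symm),
                  ← PySem.Dict.getD_eq_get?_getD, h1]
            · rw [hbr, PySem.Dict.getD_insert_self, h2]
            · exact h3
            · exact h4
            · exact Or.inr (Or.inr hcr)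

-- ===== VERDICT (by name: the statement is the Claim_ definition above) =====
theorem parse_body_sections_py_spec : Claim_equal_parse_body_sections_py := by
  intro content _
  unfold Spec_parse_body_sections_py parse_body_sections_py parse_body_sections_py_alt
  have h := pvLoop_eq ((PySem.Str.split? (pvBody content) "\n").getD []) none [] []
    PySem.Dict.empty none (by rfl) (by rfl) (by simp) (by simp) (Or.inl rfl)
  simp only [h]
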